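-- pv_equiv track=rewrite | github.com/wavefunction91/GauXC | src/cuda_integrator/collocation_generator/generate_bfeval.py | generate_cartesian_ls
-- ===== SOURCE A (Python) =====
-- def generate_cartesian_ls( L ):
--
--   l   = []
--   for i in range(L+1):
--     lx = L - i
--     for j in range(i+1):
--       ly = i - j
--       lz = L - lx - ly
--
--       l.append( [0, 0, 0] )
--
--       for k in range( lx - 1 ):
--         l[-1][0] = l[-1][0] + 1
--       for k in range( ly - 1 ):
--         l[-1][1] = l[-1][1] + 1
--       for k in range( lz - 1 ):
--         l[-1][2] = l[-1][2] + 1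
--
--       if lx > 0:
--         l[-1][0] = l[-1][0] + 1
--       if ly > 0:
--         l[-1][1] = l[-1][1] + 1
--       if lz > 0:
--         l[-1][2] = l[-1][2] + 1
--
--   return l
-- ===== SOURCE B (Python) =====
-- def generate_cartesian_ls(L):
--     # Emit each [lx, ly, lz] triple directly instead of counting up to it.
--     return [[L - i, i - j, j] for i in range(L + 1) for j in range(i + 1)]
-- ===== Notes on version B (the rewrite author's own statement) =====
-- stated objective: faster
-- what changed: B emits each [lx,ly,lz] triple directly in one nested comprehension, removing A's three inner counting loops that build each entry by repeated incrementing.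
import Mathlib
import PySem

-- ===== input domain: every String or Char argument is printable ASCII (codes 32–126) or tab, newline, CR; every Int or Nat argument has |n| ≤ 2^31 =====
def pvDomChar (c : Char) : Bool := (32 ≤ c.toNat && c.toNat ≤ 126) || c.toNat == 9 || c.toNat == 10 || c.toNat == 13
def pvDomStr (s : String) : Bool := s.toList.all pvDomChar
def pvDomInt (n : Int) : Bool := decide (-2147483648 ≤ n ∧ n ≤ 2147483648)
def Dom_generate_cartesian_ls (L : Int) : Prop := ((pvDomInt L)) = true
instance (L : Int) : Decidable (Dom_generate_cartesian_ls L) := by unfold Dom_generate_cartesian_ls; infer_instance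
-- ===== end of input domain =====

-- B emits each [lx,ly,lz] triple directly instead of building it by A's per-entry counting loops (faster).

-- ===== PORT A =====
-- 'l[-1][k] = l[-1][k] + 1' on the freshly appended 3-list: increment component k of e
def pvBump (e : List Int) (k : Nat) : List Int := e.set k ((e.getD k 0) + 1)

-- the entry built in the inner body: append [0,0,0] then count its components up
def pvEntryOf (lx ly lz : Int) : List Int :=
  let e := [(0 : Int), 0, 0]
  let e := (PySem.List.pyRange 0 (lx - 1) 1).foldl (fun e _ => pvBump e 0) e
  let e := (PySem.List.pyRange 0 (ly - 1) 1).foldl (fun e _ => pvBump e 1) e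
  let e := (PySem.List.pyRange 0 (lz - 1) 1).foldl (fun e _ => pvBump e 2) e
  let e := if lx > 0 then pvBump e 0 else e
  let e := if ly > 0 then pvBump e 1 else e
  let e := if lz > 0 then pvBump e 2 else e
  e

def generate_cartesian_ls (L : Int) : List (List Int) :=
  (PySem.List.pyRange 0 (L + 1) 1).foldl (fun l i =>
    let lx := L - i
    (PySem.List.pyRange 0 (i + 1) 1).foldl (fun l j =>
      let ly := i - j
      let lz := L - lx - ly
      l ++ [pvEntryOf lx ly lz]) l) []

-- ===== PORT B =====
def generate_cartesian_ls_alt (L : Int) : List (List Int) :=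
  (PySem.List.pyRange 0 (L + 1) 1).flatMap (fun i =>
    (PySem.List.pyRange 0 (i + 1) 1).map (fun j => [L - i, i - j, j]))

-- ===== PRECONDITION & SPEC =====
def Spec_generate_cartesian_ls (L : Int) (out : List (List Int)) : Prop := out = generate_cartesian_ls_alt L
instance (L : Int) (out : List (List Int)) : Decidable (Spec_generate_cartesian_ls L out) := by unfold Spec_generate_cartesian_ls; infer_instance

-- ===== CLAIM (what is proved, stated in full; the proofs are below) =====
def Claim_equal_generate_cartesian_ls : Prop := ∀ (L : Int), Dom_generate_cartesian_ls L → Spec_generate_cartesian_ls L (generate_cartesian_ls L)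

-- ===== LEMMAS AND PROOFS =====

theorem pvBump0 (a b c : Int) : pvBump [a, b, c] 0 = [a + 1, b, c] := rfl
theorem pvBump1 (a b c : Int) : pvBump [a, b, c] 1 = [a, b + 1, c] := rfl
theorem pvBump2 (a b c : Int) : pvBump [a, b, c] 2 = [a, b, c + 1] := rfl

theorem pvIter0 (r : List Int) (a b c : Int) :
    r.foldl (fun e _ => pvBump e 0) [a, b, c] = [a + r.length, b, c] := by
  induction r generalizing a with
  | nil => simp
  | cons x xs ih => simp [List.foldl_cons, pvBump0, ih]; ring

theorem pvIter1 (r : List Int) (a b c : Int) :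
    r.foldl (fun e _ => pvBump e 1) [a, b, c] = [a, b + r.length, c] := by
  induction r generalizing b with
  | nil => simp
  | cons x xs ih => simp [List.foldl_cons, pvBump1, ih]; ring

theorem pvIter2 (r : List Int) (a b c : Int) :
    r.foldl (fun e _ => pvBump e 2) [a, b, c] = [a, b, c + r.length] := by
  induction r generalizing c with
  | nil => simp
  | cons x xs ih => simp [List.foldl_cons, pvBump2, ih]; ring

-- counting up to t: (t-1) increments plus one more iff t > 0 gives exactly t, for t ≥ 0
theorem pvCount (t : Int) (ht : 0 ≤ t) :
    ((PySem.List.pyRange 0 (t - 1) 1).length : Int)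
      + (if t > 0 then 1 else 0) = t := by
  rw [PySem.List.length_pyRange_one]
  split_ifs with h <;> omega

theorem pvEntry (lx ly lz : Int) (hx : 0 ≤ lx) (hy : 0 ≤ ly) (hz : 0 ≤ lz) :
    pvEntryOf lx ly lz = [lx, ly, lz] := by
  unfold pvEntryOf
  simp only [pvIter0, pvIter1, pvIter2]
  have hx' := pvCount lx hx
  have hy' := pvCount ly hy
  have hz' := pvCount lz hz
  split_ifs at * <;> simp_all [pvBump0, pvBump1, pvBump2]

theorem pvInner (L i : Int) (hi : 0 ≤ i) (hiL : i ≤ L) (acc : List (List Int)) :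
    (PySem.List.pyRange 0 (i + 1) 1).foldl (fun l j =>
        l ++ [pvEntryOf (L - i) (i - j) (L - (L - i) - (i - j))]) acc
    = acc ++ (PySem.List.pyRange 0 (i + 1) 1).map (fun j => [L - i, i - j, j]) := by
  have h : ∀ (acc : List (List Int)), ∀ j ∈ PySem.List.pyRange 0 (i + 1) 1,
      acc ++ [pvEntryOf (L - i) (i - j) (L - (L - i) - (i - j))]
        = acc ++ [[L - i, i - j, j]] := by
    intro acc j hj
    rw [PySem.List.mem_pyRange_one] at hj
    rw [pvEntry (L - i) (i - j) (L - (L - i) - (i - j))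
        (by omega) (by omega) (by omega)]
    have h3 : L - (L - i) - (i - j) = j := by ring
    rw [h3]
  rw [PySem.List.foldl_congr_mem (PySem.List.pyRange 0 (i + 1) 1) (fun l j => l ++ [pvEntryOf (L - i) (i - j) (L - (L - i) - (i - j))]) (fun l j => l ++ [[L - i, i - j, j]]) acc h]
  exact PySem.List.foldl_append_singleton_eq_map _ _ _

theorem pvOuter (L : Int) :
    generate_cartesian_ls L = generate_cartesian_ls_alt L := by
  unfold generate_cartesian_ls generate_cartesian_ls_alt
  have h : ∀ (acc : List (List Int)), ∀ i ∈ PySem.List.pyRange 0 (L + 1) 1,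
      (PySem.List.pyRange 0 (i + 1) 1).foldl (fun l j =>
          l ++ [pvEntryOf (L - i) (i - j) (L - (L - i) - (i - j))]) acc
        = acc ++ (PySem.List.pyRange 0 (i + 1) 1).map (fun j => [L - i, i - j, j]) := by
    intro acc i hi
    rw [PySem.List.mem_pyRange_one] at hi
    exact pvInner L i (by omega) (by omega) acc
  rw [PySem.List.foldl_congr_mem (PySem.List.pyRange 0 (L + 1) 1)
        (fun l i => (PySem.List.pyRange 0 (i + 1) 1).foldl (fun l j =>
          l ++ [pvEntryOf (L - i) (i - j) (L - (L - i) - (i - j))]) l)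
        (fun l i => l ++ (PySem.List.pyRange 0 (i + 1) 1).map (fun j => [L - i, i - j, j]))
        ([] : List (List Int)) h]
  exact PySem.List.foldl_append_eq_flatMap _ _ _

-- ===== VERDICT (by name: the statement is the Claim_ definition above) =====
theorem generate_cartesian_ls_spec : Claim_equal_generate_cartesian_ls := by
  intro L _
  unfold Spec_generate_cartesian_ls
  exact pvOuter L
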